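-- pv_equiv track=rewrite | github.com/plut0nium/AdventOfCode | 2024/12/day_12.py | part2
-- ===== SOURCE A (Python) =====
-- DIRS = [(0, -1), (1, 0), (0, 1), (-1, 0)] # N > E > S > W
--
-- def part2(regions):
--     price = 0
--     for r in regions:
--         plots = r[1]
--         corners_count = 0
--         for p in plots:
--             # for each plot in given region
--             for i in range(len(DIRS)):
--                 j = (i + 1) % len(DIRS)
--                 x1, y1 = p[0] + DIRS[i][0], p[1] + DIRS[i][1]
--                 x2, y2 = p[0] + DIRS[j][0], p[1] + DIRS[j][1]
--                 x3, y3 = p[0] + DIRS[i][0] + DIRS[j][0], p[1] + DIRS[i][1] + DIRS[j][1]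
--                 if (x1, y1) not in plots and (x2, y2) not in plots:
--                     # two adjacent are not in region -> external corner
--                     corners_count += 1
--                 elif (x1, y1) in plots and (x2, y2) in plots and (x3, y3) not in plots:
--                     # two adjacent are in region, but not diagonal -> internal corner
--                     corners_count += 1
--         price += len(plots) * corners_count
--     return price
-- ===== SOURCE B (Python) =====
-- def part2(regions):
--     total = 0
--     for name, plots in regions:
--         cells = set(plots)
--         # candidate fence-post vertices: each cell contributes its 4 corners
--         # (vertex (a,b) is the post shared by cells (a,b),(a+1,b),(a,b+1),(a+1,b+1))
--         verts = set()
--         for (x, y) in cells: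
--             verts.update({(x - 1, y - 1), (x, y - 1), (x - 1, y), (x, y)})
--         corners = 0
--         for (a, b) in verts:
--             nw = (a, b) in cells
--             ne = (a + 1, b) in cells
--             sw = (a, b + 1) in cells
--             se = (a + 1, b + 1) in cells
--             k = nw + ne + sw + se
--             if k == 1 or k == 3:
--                 corners += 1
--             elif k == 2 and nw == se:
--                 corners += 2  # two regions touching diagonally at this post
--         total += len(plots) * corners
--     return total
-- ===== Notes on version B (the rewrite author's own statement) =====
-- stated objective: alternative
-- what changed: B abandons the per-plot direction-pair scan entirely: it builds the set of fence-post vertices (each cell's 4 corners, deduplicated) and makes one pass over vertices, classifying the 2x2 occupancy pattern around each post (1 or 3 cells -> 1 corner, 2 diagonal cells -> 2 corners), instead of A's per-plot external/internal corner tests over the plot list.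
import Mathlib
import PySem

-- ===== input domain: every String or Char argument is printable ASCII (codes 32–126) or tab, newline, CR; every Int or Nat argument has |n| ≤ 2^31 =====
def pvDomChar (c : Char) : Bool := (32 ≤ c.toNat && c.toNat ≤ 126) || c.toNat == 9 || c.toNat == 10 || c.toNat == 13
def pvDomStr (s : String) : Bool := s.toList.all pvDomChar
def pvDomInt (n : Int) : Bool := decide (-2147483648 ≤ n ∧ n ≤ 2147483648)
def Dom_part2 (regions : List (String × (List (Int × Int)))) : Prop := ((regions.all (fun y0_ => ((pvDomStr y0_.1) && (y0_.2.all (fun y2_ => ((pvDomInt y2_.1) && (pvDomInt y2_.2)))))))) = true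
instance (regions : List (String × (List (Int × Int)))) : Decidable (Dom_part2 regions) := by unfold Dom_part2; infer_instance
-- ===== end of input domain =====

-- B counts corners at fence-post vertices: one pass over the deduplicated corner vertices of
-- the region's cells, classifying each post's 2x2 occupancy pattern, instead of A's per-plot
-- direction-pair corner tests; equal totals on duplicate-free regions.

-- ===== PORT A =====
def pvDirs : List (Int × Int) := [(0, -1), (1, 0), (0, 1), (-1, 0)]  -- N > E > S > W

def part2 (regions : List (String × (List (Int × Int)))) : Int :=
  regions.foldl (fun price r =>
    let plots := r.2
    let cornersCount : Int := plots.foldl (fun cc p =>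
      (List.range pvDirs.length).foldl (fun cc i =>
        let j := (i + 1) % pvDirs.length
        let di := pvDirs.getD i (0, 0)
        let dj := pvDirs.getD j (0, 0)
        if (p.1 + di.1, p.2 + di.2) ∉ plots ∧ (p.1 + dj.1, p.2 + dj.2) ∉ plots then
          cc + 1
        else if (p.1 + di.1, p.2 + di.2) ∈ plots ∧ (p.1 + dj.1, p.2 + dj.2) ∈ plots ∧
                (p.1 + di.1 + dj.1, p.2 + di.2 + dj.2) ∉ plots then
          cc + 1
        else cc) cc) 0
    price + (plots.length : Int) * cornersCount) 0

-- ===== PORT B =====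
-- vertex (a, b) is the fence post shared by cells (a, b), (a+1, b), (a, b+1), (a+1, b+1);
-- the vertex sum is order-independent, so consuming the Python set's iteration order is exact
def part2_alt (regions : List (String × (List (Int × Int)))) : Int :=
  regions.foldl (fun total r =>
    let plots := r.2
    let cells : PySem.Set (Int × Int) := PySem.Set.ofList plots
    let verts : PySem.Set (Int × Int) :=
      cells.foldl (fun vs p =>
        PySem.Set.update vs [(p.1 - 1, p.2 - 1), (p.1, p.2 - 1), (p.1 - 1, p.2), (p.1, p.2)])
        PySem.Set.empty
    let corners : Int := verts.foldl (fun c v =>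
      let k : Int :=
        (if (v.1, v.2) ∈ cells then 1 else 0) + (if (v.1 + 1, v.2) ∈ cells then 1 else 0) +
        (if (v.1, v.2 + 1) ∈ cells then 1 else 0) + (if (v.1 + 1, v.2 + 1) ∈ cells then 1 else 0)
      if k = 1 ∨ k = 3 then c + 1
      else if k = 2 ∧ ((v.1, v.2) ∈ cells ↔ (v.1 + 1, v.2 + 1) ∈ cells) then c + 2
      else c) 0
    total + (plots.length : Int) * corners) 0

-- ===== PRECONDITION & SPEC =====
-- The Python plots argument is a set; Pre_ states the Nodup invariant of its list
-- representation (it excludes no reachable input).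
def Pre_part2 (regions : List (String × (List (Int × Int)))) : Prop :=
  ∀ r ∈ regions, r.2.Nodup
instance (regions : List (String × (List (Int × Int)))) : Decidable (Pre_part2 regions) := by
  unfold Pre_part2; infer_instance

def pvWitness_part2 : (List (String × (List (Int × Int)))) := [("r", [(0, 0), (1, 0), (0, 1)])]

def Spec_part2 (regions : List (String × (List (Int × Int)))) (out : Int) : Prop := out = part2_alt regions
instance (regions : List (String × (List (Int × Int)))) (out : Int) : Decidable (Spec_part2 regions out) := by unfold Spec_part2; infer_instance

-- ===== CLAIM (what is proved, stated in full; the proofs are below) =====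
def Claim_equal_part2 : Prop := ∀ (regions : List (String × (List (Int × Int)))), Dom_part2 regions → Pre_part2 regions → Spec_part2 regions (part2 regions)

-- ===== LEMMAS AND PROOFS =====

-- proof-layer vocabulary
def pvOff (p v : Int × Int) : Int × Int := (p.1 + v.1, p.2 + v.2)
def pvD (i : Nat) : Int × Int := pvDirs.getD i (0, 0)

-- per-(plot, direction-pair) contribution of A's inner loop
def termA (l : List (Int × Int)) (p : Int × Int) (i : Nat) : Int :=
  if pvOff p (pvD i) ∉ l ∧ pvOff p (pvD ((i + 1) % pvDirs.length)) ∉ l then 1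
  else if pvOff p (pvD i) ∈ l ∧ pvOff p (pvD ((i + 1) % pvDirs.length)) ∈ l ∧
          pvOff (pvOff p (pvD i)) (pvD ((i + 1) % pvDirs.length)) ∉ l then 1
  else 0

def sumA (l : List (Int × Int)) (p : Int × Int) : Int :=
  termA l p 0 + termA l p 1 + termA l p 2 + termA l p 3

def cornersA (l : List (Int × Int)) : Int := (l.map (fun p => sumA l p)).sum

-- per-vertex contribution of B's inner loop (memberships already in the plain list)
def gV (l : List (Int × Int)) (v : Int × Int) : Int :=
  let k : Int :=
    (if (v.1, v.2) ∈ l then 1 else 0) + (if (v.1 + 1, v.2) ∈ l then 1 else 0) +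
    (if (v.1, v.2 + 1) ∈ l then 1 else 0) + (if (v.1 + 1, v.2 + 1) ∈ l then 1 else 0)
  if k = 1 ∨ k = 3 then 1
  else if k = 2 ∧ ((v.1, v.2) ∈ l ↔ (v.1 + 1, v.2 + 1) ∈ l) then 2
  else 0

def fourOf (p : Int × Int) : List (Int × Int) :=
  [(p.1 - 1, p.2 - 1), (p.1, p.2 - 1), (p.1 - 1, p.2), (p.1, p.2)]

def vertsOf (cs : List (Int × Int)) : PySem.Set (Int × Int) :=
  cs.foldl (fun vs p => PySem.Set.update vs (fourOf p)) PySem.Set.empty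

-- termA at the four vertex-relative cell positions
lemma tA0 (l : List (Int × Int)) (a b : Int) :
    termA l (a, b + 1) 0 =
      (if (a, b) ∉ l ∧ (a + 1, b + 1) ∉ l then 1
       else if (a, b) ∈ l ∧ (a + 1, b + 1) ∈ l ∧ (a + 1, b) ∉ l then 1 else 0) := by
  have e1 : (a + (0:Int), b + 1 + (-1:Int)) = (a, b) := by norm_num
  have e2 : (a + (1:Int), b + 1 + (0:Int)) = (a + 1, b + 1) := by norm_num
  have e3 : (a + (0:Int) + 1, b + 1 + (-1:Int) + 0) = (a + 1, b) := by norm_num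
  simp only [termA, pvOff, pvD, pvDirs]
  norm_num [e1, e2, e3]

lemma tA1 (l : List (Int × Int)) (a b : Int) :
    termA l (a, b) 1 =
      (if (a + 1, b) ∉ l ∧ (a, b + 1) ∉ l then 1
       else if (a + 1, b) ∈ l ∧ (a, b + 1) ∈ l ∧ (a + 1, b + 1) ∉ l then 1 else 0) := by
  have e1 : (a + (1:Int), b + (0:Int)) = (a + 1, b) := by norm_num
  have e2 : (a + (0:Int), b + (1:Int)) = (a, b + 1) := by norm_num
  have e3 : (a + (1:Int) + 0, b + (0:Int) + 1) = (a + 1, b + 1) := by norm_num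
  simp only [termA, pvOff, pvD, pvDirs]
  norm_num [e1, e2, e3]

lemma tA2 (l : List (Int × Int)) (a b : Int) :
    termA l (a + 1, b) 2 =
      (if (a + 1, b + 1) ∉ l ∧ (a, b) ∉ l then 1
       else if (a + 1, b + 1) ∈ l ∧ (a, b) ∈ l ∧ (a, b + 1) ∉ l then 1 else 0) := by
  have e1 : (a + 1 + (0:Int), b + (1:Int)) = (a + 1, b + 1) := by norm_num
  have e2 : (a + 1 + (-1:Int), b + (0:Int)) = (a, b) := by norm_num
  have e3 : (a + 1 + (0:Int) + -1, b + (1:Int) + 0) = (a, b + 1) := by norm_num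
  simp only [termA, pvOff, pvD, pvDirs]
  norm_num [e1, e2, e3]

lemma tA3 (l : List (Int × Int)) (a b : Int) :
    termA l (a + 1, b + 1) 3 =
      (if (a, b + 1) ∉ l ∧ (a + 1, b) ∉ l then 1
       else if (a, b + 1) ∈ l ∧ (a + 1, b) ∈ l ∧ (a, b) ∉ l then 1 else 0) := by
  have e1 : (a + 1 + (-1:Int), b + 1 + (0:Int)) = (a, b + 1) := by norm_num
  have e2 : (a + 1 + (0:Int), b + 1 + (-1:Int)) = (a + 1, b) := by norm_num
  have e3 : (a + 1 + (-1:Int) + 0, b + 1 + (0:Int) + -1) = (a, b) := by norm_num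
  simp only [termA, pvOff, pvD, pvDirs]
  norm_num [e1, e2, e3]

-- regrouping A's four direction-pair terms by the fence-post vertex each corner sits on:
-- at vertex (a,b), the 2x2 pattern value equals the sum of the adjacent cells' contributions
lemma gV_eq (l : List (Int × Int)) (a b : Int) :
    gV l (a, b) =
      (if (a, b) ∈ l then termA l (a, b) 1 else 0) +
      (if (a + 1, b) ∈ l then termA l (a + 1, b) 2 else 0) +
      (if (a, b + 1) ∈ l then termA l (a, b + 1) 0 else 0) +
      (if (a + 1, b + 1) ∈ l then termA l (a + 1, b + 1) 3 else 0) := by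
  rw [tA0, tA1, tA2, tA3]
  by_cases h1 : (a, b) ∈ l <;> by_cases h2 : (a + 1, b) ∈ l <;>
    by_cases h3 : (a, b + 1) ∈ l <;> by_cases h4 : (a + 1, b + 1) ∈ l <;>
      simp [gV, h1, h2, h3, h4]

lemma nodup_vertsOf_aux (cs : List (Int × Int)) (vs : PySem.Set (Int × Int)) (h : vs.Nodup) :
    (cs.foldl (fun vs p => PySem.Set.update vs (fourOf p)) vs).Nodup := by
  induction cs generalizing vs with
  | nil => exact h
  | cons c cs ih => exact ih _ (PySem.Set.nodup_update _ _ h)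

lemma mem_vertsOf_aux (cs : List (Int × Int)) (vs : PySem.Set (Int × Int)) (v : Int × Int) :
    v ∈ cs.foldl (fun vs p => PySem.Set.update vs (fourOf p)) vs ↔
      v ∈ vs ∨ ∃ p ∈ cs, v ∈ fourOf p := by
  induction cs generalizing vs with
  | nil => simp
  | cons c cs ih =>
    simp only [List.foldl_cons, ih, PySem.Set.mem_update, List.mem_cons]
    constructor
    · rintro ((h | h) | ⟨p, hp, hv⟩)
      · exact Or.inl h
      · exact Or.inr ⟨c, Or.inl rfl, h⟩
      · exact Or.inr ⟨p, Or.inr hp, hv⟩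
    · rintro (h | ⟨p, (rfl | hp), hv⟩)
      · exact Or.inl (Or.inl h)
      · exact Or.inl (Or.inr hv)
      · exact Or.inr ⟨p, hp, hv⟩

-- one shifted fiber of the vertex sum collapses onto the plot set
lemma sum_shift (l : List (Int × Int)) (V : Finset (Int × Int)) (u1 u2 : Int)
    (F : Int × Int → Int) (hV : ∀ p ∈ l, (p.1 - u1, p.2 - u2) ∈ V) :
    (∑ v ∈ V, if (v.1 + u1, v.2 + u2) ∈ l then F (v.1 + u1, v.2 + u2) else 0)
      = ∑ p ∈ l.toFinset, F p := by
  rw [← Finset.sum_filter]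
  apply Finset.sum_nbij' (i := fun v => (v.1 + u1, v.2 + u2)) (j := fun p => (p.1 - u1, p.2 - u2))
  · intro v hv
    simp only [Finset.mem_filter] at hv
    simpa using hv.2
  · intro p hp
    simp only [List.mem_toFinset] at hp
    simp only [Finset.mem_filter]
    refine ⟨hV p hp, ?_⟩
    have e : (p.1 - u1 + u1, p.2 - u2 + u2) = p := by cases p; simp
    rw [e]; exact hp
  · intro v hv; simp
  · intro p hp
    have : (p.1 - u1 + u1, p.2 - u2 + u2) = p := by cases p; simp
    exact this
  · intro v hv; rfl

lemma vertex_sum_eq (l : List (Int × Int)) (hn : l.Nodup) :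
    ((vertsOf (PySem.Set.ofList l)).map (fun v => gV l v)).sum = cornersA l := by
  have hnv : (vertsOf (PySem.Set.ofList l)).Nodup :=
    nodup_vertsOf_aux _ _ List.nodup_nil
  have hmem : ∀ v, v ∈ vertsOf (PySem.Set.ofList l) ↔ ∃ p ∈ l, v ∈ fourOf p := by
    intro v
    unfold vertsOf
    rw [mem_vertsOf_aux]
    simp only [PySem.Set.mem_ofList, PySem.Set.empty]
    simp
  rw [← List.sum_toFinset _ hnv]
  set V := (vertsOf (PySem.Set.ofList l)).toFinset with hVdef
  have hVmem : ∀ p ∈ l, ∀ v ∈ fourOf p, v ∈ V := by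
    intro p hp v hv
    rw [hVdef, List.mem_toFinset, hmem]
    exact ⟨p, hp, hv⟩
  have h1 : ∀ p ∈ l, (p.1 - 0, p.2 - 0) ∈ V := by
    intro p hp; apply hVmem p hp; simp [fourOf]
  have h2 : ∀ p ∈ l, (p.1 - 1, p.2 - 0) ∈ V := by
    intro p hp; apply hVmem p hp; simp [fourOf]
  have h3 : ∀ p ∈ l, (p.1 - 0, p.2 - 1) ∈ V := by
    intro p hp; apply hVmem p hp; simp [fourOf]
  have h4 : ∀ p ∈ l, (p.1 - 1, p.2 - 1) ∈ V := by
    intro p hp; apply hVmem p hp; simp [fourOf]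
  have hg : ∀ v ∈ V, gV l v =
      (if (v.1 + 0, v.2 + 0) ∈ l then termA l (v.1 + 0, v.2 + 0) 1 else 0) +
      (if (v.1 + 1, v.2 + 0) ∈ l then termA l (v.1 + 1, v.2 + 0) 2 else 0) +
      (if (v.1 + 0, v.2 + 1) ∈ l then termA l (v.1 + 0, v.2 + 1) 0 else 0) +
      (if (v.1 + 1, v.2 + 1) ∈ l then termA l (v.1 + 1, v.2 + 1) 3 else 0) := by
    intro v _
    have := gV_eq l v.1 v.2
    simpa using this
  rw [Finset.sum_congr rfl hg]
  simp only [Finset.sum_add_distrib]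
  rw [sum_shift l V 0 0 (fun p => termA l p 1) h1,
      sum_shift l V 1 0 (fun p => termA l p 2) h2,
      sum_shift l V 0 1 (fun p => termA l p 0) h3,
      sum_shift l V 1 1 (fun p => termA l p 3) h4]
  rw [cornersA, ← List.sum_toFinset _ hn]
  rw [← Finset.sum_add_distrib, ← Finset.sum_add_distrib, ← Finset.sum_add_distrib]
  apply Finset.sum_congr rfl
  intro p _
  simp [sumA]; ring

-- A's port computes len * cornersA per region
lemma innerA_eq (l : List (Int × Int)) (p : Int × Int) (cc : Int) :
    (List.range pvDirs.length).foldl (fun cc i =>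
        let j := (i + 1) % pvDirs.length
        let di := pvDirs.getD i (0, 0)
        let dj := pvDirs.getD j (0, 0)
        if (p.1 + di.1, p.2 + di.2) ∉ l ∧ (p.1 + dj.1, p.2 + dj.2) ∉ l then cc + 1
        else if (p.1 + di.1, p.2 + di.2) ∈ l ∧ (p.1 + dj.1, p.2 + dj.2) ∈ l ∧
                (p.1 + di.1 + dj.1, p.2 + di.2 + dj.2) ∉ l then cc + 1
        else cc) cc = cc + sumA l p := by
  have hb : (fun (cc : Int) (i : Nat) =>
      let j := (i + 1) % pvDirs.length
      let di := pvDirs.getD i (0, 0)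
      let dj := pvDirs.getD j (0, 0)
      if (p.1 + di.1, p.2 + di.2) ∉ l ∧ (p.1 + dj.1, p.2 + dj.2) ∉ l then cc + 1
      else if (p.1 + di.1, p.2 + di.2) ∈ l ∧ (p.1 + dj.1, p.2 + dj.2) ∈ l ∧
              (p.1 + di.1 + dj.1, p.2 + di.2 + dj.2) ∉ l then cc + 1
      else cc) = fun cc i => cc + termA l p i := by
    funext cc i
    show _ = cc + termA l p i
    simp only [termA, pvOff, pvD]
    split_ifs <;> ring
  rw [hb, PySem.List.foldl_add]
  have : List.range pvDirs.length = [0, 1, 2, 3] := by decide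
  rw [this]
  simp only [List.map_cons, List.map_nil, List.sum_cons, List.sum_nil, sumA]
  ring

lemma part2_eq (regions : List (String × (List (Int × Int)))) :
    part2 regions = (regions.map (fun r => (r.2.length : Int) * cornersA r.2)).sum := by
  unfold part2
  have hmid : ∀ (l : List (Int × Int)),
      l.foldl (fun cc p =>
        (List.range pvDirs.length).foldl (fun cc i =>
          let j := (i + 1) % pvDirs.length
          let di := pvDirs.getD i (0, 0)
          let dj := pvDirs.getD j (0, 0)
          if (p.1 + di.1, p.2 + di.2) ∉ l ∧ (p.1 + dj.1, p.2 + dj.2) ∉ l then cc + 1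
          else if (p.1 + di.1, p.2 + di.2) ∈ l ∧ (p.1 + dj.1, p.2 + dj.2) ∈ l ∧
                  (p.1 + di.1 + dj.1, p.2 + di.2 + dj.2) ∉ l then cc + 1
          else cc) cc) 0 = cornersA l := by
    intro l
    have hf : (fun (cc : Int) (p : Int × Int) =>
        (List.range pvDirs.length).foldl (fun cc i =>
          let j := (i + 1) % pvDirs.length
          let di := pvDirs.getD i (0, 0)
          let dj := pvDirs.getD j (0, 0)
          if (p.1 + di.1, p.2 + di.2) ∉ l ∧ (p.1 + dj.1, p.2 + dj.2) ∉ l then cc + 1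
          else if (p.1 + di.1, p.2 + di.2) ∈ l ∧ (p.1 + dj.1, p.2 + dj.2) ∈ l ∧
                  (p.1 + di.1 + dj.1, p.2 + di.2 + dj.2) ∉ l then cc + 1
          else cc) cc) = fun cc p => cc + sumA l p := by
      funext cc p; exact innerA_eq l p cc
    rw [hf, PySem.List.foldl_add, zero_add, cornersA]
  have hout : (fun (price : Int) (r : String × List (Int × Int)) =>
      price + (r.2.length : Int) *
        (r.2.foldl (fun cc p =>
          (List.range pvDirs.length).foldl (fun cc i =>
            let j := (i + 1) % pvDirs.length
            let di := pvDirs.getD i (0, 0)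
            let dj := pvDirs.getD j (0, 0)
            if (p.1 + di.1, p.2 + di.2) ∉ r.2 ∧ (p.1 + dj.1, p.2 + dj.2) ∉ r.2 then cc + 1
            else if (p.1 + di.1, p.2 + di.2) ∈ r.2 ∧ (p.1 + dj.1, p.2 + dj.2) ∈ r.2 ∧
                    (p.1 + di.1 + dj.1, p.2 + di.2 + dj.2) ∉ r.2 then cc + 1
            else cc) cc) 0)) =
      fun price r => price + (r.2.length : Int) * cornersA r.2 := by
    funext price r; rw [hmid r.2]
  rw [hout, PySem.List.foldl_add, zero_add]

-- B's port computes len * (vertex sum of gV) per region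
lemma part2_alt_eq (regions : List (String × (List (Int × Int)))) :
    part2_alt regions =
      (regions.map (fun r => (r.2.length : Int) *
        ((vertsOf (PySem.Set.ofList r.2)).map (fun v => gV r.2 v)).sum)).sum := by
  unfold part2_alt
  show List.foldl (fun (total : Int) (r : String × List (Int × Int)) =>
      total + (r.2.length : Int) *
        ((vertsOf (PySem.Set.ofList r.2)).foldl (fun c v =>
          let k : Int :=
            (if (v.1, v.2) ∈ PySem.Set.ofList r.2 then 1 else 0) +
            (if (v.1 + 1, v.2) ∈ PySem.Set.ofList r.2 then 1 else 0) +
            (if (v.1, v.2 + 1) ∈ PySem.Set.ofList r.2 then 1 else 0) +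
            (if (v.1 + 1, v.2 + 1) ∈ PySem.Set.ofList r.2 then 1 else 0)
          if k = 1 ∨ k = 3 then c + 1
          else if k = 2 ∧ ((v.1, v.2) ∈ PySem.Set.ofList r.2 ↔ (v.1 + 1, v.2 + 1) ∈ PySem.Set.ofList r.2) then c + 2
          else c) 0)) 0 regions = _
  have hmid : ∀ (l : List (Int × Int)),
      (vertsOf (PySem.Set.ofList l)).foldl (fun c v =>
        let k : Int :=
          (if (v.1, v.2) ∈ PySem.Set.ofList l then 1 else 0) +
          (if (v.1 + 1, v.2) ∈ PySem.Set.ofList l then 1 else 0) +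
          (if (v.1, v.2 + 1) ∈ PySem.Set.ofList l then 1 else 0) +
          (if (v.1 + 1, v.2 + 1) ∈ PySem.Set.ofList l then 1 else 0)
        if k = 1 ∨ k = 3 then c + 1
        else if k = 2 ∧ ((v.1, v.2) ∈ PySem.Set.ofList l ↔ (v.1 + 1, v.2 + 1) ∈ PySem.Set.ofList l) then c + 2
        else c) 0 = ((vertsOf (PySem.Set.ofList l)).map (fun v => gV l v)).sum := by
    intro l
    have hf : (fun (c : Int) (v : Int × Int) =>
        let k : Int :=
          (if (v.1, v.2) ∈ PySem.Set.ofList l then 1 else 0) +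
          (if (v.1 + 1, v.2) ∈ PySem.Set.ofList l then 1 else 0) +
          (if (v.1, v.2 + 1) ∈ PySem.Set.ofList l then 1 else 0) +
          (if (v.1 + 1, v.2 + 1) ∈ PySem.Set.ofList l then 1 else 0)
        if k = 1 ∨ k = 3 then c + 1
        else if k = 2 ∧ ((v.1, v.2) ∈ PySem.Set.ofList l ↔ (v.1 + 1, v.2 + 1) ∈ PySem.Set.ofList l) then c + 2
        else c) = fun c v => c + gV l v := by
      funext c v
      show _ = c + gV l v
      simp only [gV, PySem.Set.mem_ofList]
      split_ifs <;> ring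
    rw [hf, PySem.List.foldl_add, zero_add]
  have hout : (fun (total : Int) (r : String × List (Int × Int)) =>
      total + (r.2.length : Int) *
        ((vertsOf (PySem.Set.ofList r.2)).foldl (fun c v =>
          let k : Int :=
            (if (v.1, v.2) ∈ PySem.Set.ofList r.2 then 1 else 0) +
            (if (v.1 + 1, v.2) ∈ PySem.Set.ofList r.2 then 1 else 0) +
            (if (v.1, v.2 + 1) ∈ PySem.Set.ofList r.2 then 1 else 0) +
            (if (v.1 + 1, v.2 + 1) ∈ PySem.Set.ofList r.2 then 1 else 0)
          if k = 1 ∨ k = 3 then c + 1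
          else if k = 2 ∧ ((v.1, v.2) ∈ PySem.Set.ofList r.2 ↔ (v.1 + 1, v.2 + 1) ∈ PySem.Set.ofList r.2) then c + 2
          else c) 0)) =
      fun total r => total + (r.2.length : Int) *
        ((vertsOf (PySem.Set.ofList r.2)).map (fun v => gV r.2 v)).sum := by
    funext total r
    rw [hmid r.2]
  rw [hout, PySem.List.foldl_add, zero_add]

-- ===== VERDICT (by name: the statement is the Claim_ definition above) =====
theorem part2_spec : Claim_equal_part2 := by
  intro regions _ hpre
  unfold Spec_part2
  rw [part2_eq, part2_alt_eq]
  congr 1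
  exact List.map_congr_left (fun r hr => by rw [vertex_sum_eq r.2 (hpre r hr)])
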